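-- pv_equiv track=rewrite | github.com/coalacorey/advent-of-code | 2022/day_14/solution_14.py | generate_cave_map
-- ===== SOURCE A (Python) =====
-- def generate_cave_map(stones, y_max):
--     x_min = min(stones)[0]
--     x_max = max(stones)[0]
--     map = dict()
--     for y in range(0, y_max + 1):
--         for x in range(x_min, x_max + 1):
--             # stone = 1, air = 0
--             map[(x, y)] = int((x, y) in stones)
--     return map
-- ===== SOURCE B (Python) =====
-- def generate_cave_map(stones, y_max):
--     xs = [x for (x, _) in stones]
--     x_min = min(xs)
--     x_max = max(xs)
--     cave = dict.fromkeys(((x, y) for y in range(y_max + 1)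
--                           for x in range(x_min, x_max + 1)), 0)
--     for (x, y) in stones:
--         if 0 <= y <= y_max:
--             cave[(x, y)] = 1
--     return cave
-- ===== Notes on version B (the rewrite author's own statement) =====
-- stated objective: alternative
-- what changed: Replaces A's per-cell membership scan of the stone list by a flat dict.fromkeys zero-fill of the rectangle (x-bounds taken as min/max of the x-coordinates alone) followed by one stone-driven marking pass guarded by 0 <= y <= y_max.
import Mathlib
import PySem

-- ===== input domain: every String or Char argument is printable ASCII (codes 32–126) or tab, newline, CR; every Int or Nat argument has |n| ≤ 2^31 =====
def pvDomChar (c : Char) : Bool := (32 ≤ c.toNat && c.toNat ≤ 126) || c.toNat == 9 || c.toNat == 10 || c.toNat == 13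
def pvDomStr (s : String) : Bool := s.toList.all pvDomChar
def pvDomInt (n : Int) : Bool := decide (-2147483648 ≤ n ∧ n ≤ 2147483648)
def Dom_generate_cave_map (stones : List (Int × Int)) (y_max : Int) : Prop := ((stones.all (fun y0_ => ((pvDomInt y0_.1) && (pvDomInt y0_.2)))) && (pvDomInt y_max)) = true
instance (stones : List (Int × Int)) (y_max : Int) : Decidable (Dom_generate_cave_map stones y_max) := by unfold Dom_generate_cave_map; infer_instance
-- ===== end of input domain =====

-- B replaces A's per-cell membership scan of the stone list by a flat dict.fromkeys
-- zero-fill of the rectangle followed by one stone-driven marking pass.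

-- ===== PORT A =====
def generate_cave_map (stones : List (Int × Int)) (y_max : Int) : List (Int × Int × Int) :=
  match PySem.List.min2? stones Prod.fst Prod.snd, PySem.List.max2? stones Prod.fst Prod.snd with
  | some mn, some mx =>
    let x_min := mn.1
    let x_max := mx.1
    let m := (PySem.List.pyRange 0 (y_max + 1)).foldl (fun d y =>
        (PySem.List.pyRange x_min (x_max + 1)).foldl (fun d x =>
          d.insert (x, y) (if (x, y) ∈ stones then (1 : Int) else 0)) d)
      PySem.Dict.empty
    m.items.map (fun p => (p.1.1, p.1.2, p.2))
  | _, _ => []  -- unreachable under Pre_ (Python's min/max raise on an empty list)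

-- ===== PORT B =====
def generate_cave_map_alt (stones : List (Int × Int)) (y_max : Int) : List (Int × Int × Int) :=
  let xs := stones.map Prod.fst
  match PySem.List.min? xs (fun v => v) with
  | none => []  -- unreachable under Pre_ (Python's min raises on an empty list)
  | some x_min =>
   match PySem.List.max? xs (fun v => v) with
   | none => []  -- unreachable under Pre_
   | some x_max =>
    -- dict.fromkeys over the flat row-major key generator, default 0
    let cave0 := ((PySem.List.pyRange 0 (y_max + 1)).flatMap
        (fun y => (PySem.List.pyRange x_min (x_max + 1)).map (fun x => (x, y)))).foldl
      (fun d k => d.insert k (0 : Int)) PySem.Dict.empty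
    let cave := stones.foldl (fun d s =>
        if 0 ≤ s.2 ∧ s.2 ≤ y_max then d.insert s (1 : Int) else d) cave0
    cave.items.map (fun p => (p.1.1, p.1.2, p.2))

-- ===== PRECONDITION & SPEC =====
-- Pre_ excludes only the empty stone list, on which Python's min() raises ValueError.
def Pre_generate_cave_map (stones : List (Int × Int)) (y_max : Int) : Prop := stones ≠ []
instance (stones : List (Int × Int)) (y_max : Int) : Decidable (Pre_generate_cave_map stones y_max) := by unfold Pre_generate_cave_map; infer_instance
def pvWitness_generate_cave_map : (List (Int × Int)) × Int := ([(0, 0), (2, 1)], 2)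

def Spec_generate_cave_map (stones : List (Int × Int)) (y_max : Int) (out : List (Int × Int × Int)) : Prop := out = generate_cave_map_alt stones y_max
instance (stones : List (Int × Int)) (y_max : Int) (out : List (Int × Int × Int)) : Decidable (Spec_generate_cave_map stones y_max out) := by unfold Spec_generate_cave_map; infer_instance

-- ===== CLAIM (what is proved, stated in full; the proofs are below) =====
def Claim_equal_generate_cave_map : Prop := ∀ (stones : List (Int × Int)) (y_max : Int), Dom_generate_cave_map stones y_max → Pre_generate_cave_map stones y_max → Spec_generate_cave_map stones y_max (generate_cave_map stones y_max)

-- ===== LEMMAS AND PROOFS =====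

-- the row-major key list of the bounding rectangle
def caveKeys (x_min x_max y_max : Int) : List (Int × Int) :=
  (PySem.List.pyRange 0 (y_max + 1)).flatMap
    (fun y => (PySem.List.pyRange x_min (x_max + 1)).map (fun x => (x, y)))

lemma nested_eq_flat (v : (Int × Int) → Int) (ys xs : List Int)
    (d : PySem.Dict (Int × Int) Int) :
    ys.foldl (fun d y => xs.foldl (fun d x => d.insert (x, y) (v (x, y))) d) d
      = (ys.flatMap (fun y => xs.map (fun x => (x, y)))).foldl
          (fun d k => d.insert k (v k)) d := by
  induction ys generalizing d with
  | nil => simp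
  | cons y ys ih => simp [List.foldl_append, List.foldl_map, ih]

lemma nodup_caveKeys (x_min x_max y_max : Int) : (caveKeys x_min x_max y_max).Nodup := by
  unfold caveKeys
  rw [List.nodup_flatMap]
  constructor
  · intro y _
    exact (PySem.List.nodup_pyRange_one _ _).map (fun a b h => by
      simpa using congrArg Prod.fst h)
  · refine (PySem.List.pairwise_lt_pyRange_one 0 (y_max + 1)).imp ?_
    intro y1 y2 hlt a ha hb
    simp only [List.mem_map] at ha hb
    obtain ⟨x1, _, rfl⟩ := ha
    obtain ⟨x2, _, h⟩ := hb
    have := congrArg Prod.snd h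
    simp at this
    omega

lemma mem_caveKeys {x_min x_max y_max : Int} {k : Int × Int} :
    k ∈ caveKeys x_min x_max y_max ↔
      (x_min ≤ k.1 ∧ k.1 ≤ x_max) ∧ (0 ≤ k.2 ∧ k.2 ≤ y_max) := by
  unfold caveKeys
  constructor
  · intro h
    simp only [List.mem_flatMap, List.mem_map] at h
    obtain ⟨y, hy, x, hx, rfl⟩ := h
    rw [PySem.List.mem_pyRange_one] at hy hx
    simp only []
    omega
  · rintro ⟨⟨h1, h2⟩, ⟨h3, h4⟩⟩
    simp only [List.mem_flatMap, List.mem_map]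
    exact ⟨k.2, PySem.List.mem_pyRange_one.mpr (by omega),
           k.1, PySem.List.mem_pyRange_one.mpr (by omega), rfl⟩

-- filling a fresh rectangle: the items are exactly the keys paired with their values
lemma fill_items (v : (Int × Int) → Int) (x_min x_max y_max : Int) :
    ((caveKeys x_min x_max y_max).foldl (fun d k => d.insert k (v k))
        (PySem.Dict.empty : PySem.Dict (Int × Int) Int)).items
      = (caveKeys x_min x_max y_max).map (fun k => (k, v k)) := by
  have h := PySem.Dict.items_foldl_insert_fresh (caveKeys x_min x_max y_max)
      (fun a => a) v (PySem.Dict.empty : PySem.Dict (Int × Int) Int)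
      (fun a _ => PySem.Dict.contains_empty a)
      (by simpa using nodup_caveKeys x_min x_max y_max)
  simpa using h

-- the marking pass: overwrites in place, so the items stay the keys in order,
-- with value 1 at every stone already in the rectangle
lemma mark_items (y_max : Int) (K : List (Int × Int))
    (hK : ∀ k ∈ K, 0 ≤ k.2 ∧ k.2 ≤ y_max) :
    ∀ (l : List (Int × Int)) (g : (Int × Int) → Int) (d : PySem.Dict (Int × Int) Int),
      (∀ s ∈ l, (0 ≤ s.2 ∧ s.2 ≤ y_max) → s ∈ K) →
      d.items = K.map (fun k => (k, g k)) →
      (l.foldl (fun d s => if 0 ≤ s.2 ∧ s.2 ≤ y_max then d.insert s 1 else d) d).items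
        = K.map (fun k => (k, if k ∈ l then 1 else g k)) := by
  intro l
  induction l with
  | nil => intro g d _ hd; simpa using hd
  | cons s t ih =>
    intro g d hmem hd
    by_cases hg : 0 ≤ s.2 ∧ s.2 ≤ y_max
    · have hsK : s ∈ K := hmem s (by simp) hg
      have hcont : d.contains s = true := by
        rw [PySem.Dict.contains_iff_mem_keys]
        have hkeys : d.keys = d.items.map (·.1) := rfl
        rw [hkeys, hd]
        simp only [List.map_map]
        simpa using hsK
      have hins : (d.insert s (1 : Int)).items
          = K.map (fun k => (k, if k = s then (1 : Int) else g k)) := by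
        rw [PySem.Dict.items_insert_of_contains d (1 : Int) hcont, hd, List.map_map]
        refine List.map_congr_left ?_
        intro k _
        by_cases hks : k = s <;> simp [hks]
      simp only [List.foldl_cons, if_pos hg]
      rw [ih (fun k => if k = s then (1 : Int) else g k) _
            (fun s' hs' hgs' => hmem s' (by simp [hs']) hgs') hins]
      refine List.map_congr_left ?_
      intro k _
      by_cases hkt : k ∈ t
      · simp [hkt]
      · by_cases hks : k = s <;> simp [hkt, hks]
    · simp only [List.foldl_cons, if_neg hg]
      rw [ih g d (fun s' hs' hgs' => hmem s' (by simp [hs']) hgs') hd]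
      refine List.map_congr_left ?_
      intro k hk
      by_cases hkt : k ∈ t
      · simp [hkt]
      · have hks : k ≠ s := by
          intro h; subst h; exact hg (hK k hk)
        simp [hkt, hks]

-- min2?/max2? (Python's tuple min/max) as explicit folds; their first components
-- bound all first components and are attained by some stone
def pvMinStep (acc : Option (Int × Int)) (x : Int × Int) : Option (Int × Int) :=
  match acc with
  | none => some x
  | some m => if (decide (x.1 < m.1) || !decide (m.1 < x.1) && decide (x.2 < m.2)) = true
              then some x else some m

def pvMaxStep (acc : Option (Int × Int)) (x : Int × Int) : Option (Int × Int) :=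
  match acc with
  | none => some x
  | some m => if (decide (m.1 < x.1) || !decide (x.1 < m.1) && decide (m.2 < x.2)) = true
              then some x else some m

lemma min2_eq_foldl (stones : List (Int × Int)) :
    PySem.List.min2? stones Prod.fst Prod.snd = stones.foldl pvMinStep none := by
  unfold PySem.List.min2?
  congr 1
  funext acc x
  cases acc <;> rfl

lemma max2_eq_foldl (stones : List (Int × Int)) :
    PySem.List.max2? stones Prod.fst Prod.snd = stones.foldl pvMaxStep none := by
  unfold PySem.List.max2?
  congr 1
  funext acc x
  cases acc <;> rfl

lemma min2_foldl_le :
    ∀ (l : List (Int × Int)) (a m : Int × Int),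
      l.foldl pvMinStep (some a) = some m →
        (m = a ∨ m ∈ l) ∧ m.1 ≤ a.1 ∧ ∀ s ∈ l, m.1 ≤ s.1 := by
  intro l
  induction l with
  | nil => intro a m h; simp at h; subst h; simp
  | cons x t ih =>
    intro a m h
    simp only [List.foldl_cons, pvMinStep] at h
    by_cases hc : (decide (x.1 < a.1) || !decide (a.1 < x.1) && decide (x.2 < a.2)) = true
    · rw [if_pos hc] at h
      obtain ⟨hm, h1, h2⟩ := ih x m h
      have hxa : x.1 ≤ a.1 := by
        simp only [Bool.or_eq_true, Bool.and_eq_true, decide_eq_true_eq,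
          Bool.not_eq_eq_eq_not, Bool.not_true, decide_eq_false_iff_not] at hc
        rcases hc with h' | ⟨h', _⟩ <;> omega
      refine ⟨?_, le_trans h1 hxa, fun s hs => ?_⟩
      · rcases hm with rfl | hm
        · exact Or.inr (by simp)
        · exact Or.inr (by simp [hm])
      · rcases List.mem_cons.mp hs with rfl | hs
        · exact h1
        · exact h2 s hs
    · rw [if_neg hc] at h
      obtain ⟨hm, h1, h2⟩ := ih a m h
      have hax : a.1 ≤ x.1 := by
        simp only [Bool.or_eq_true, Bool.and_eq_true, decide_eq_true_eq,
          Bool.not_eq_eq_eq_not, Bool.not_true, decide_eq_false_iff_not, not_or,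
          not_and, not_lt] at hc
        exact hc.1
      refine ⟨?_, h1, fun s hs => ?_⟩
      · rcases hm with rfl | hm
        · exact Or.inl rfl
        · exact Or.inr (by simp [hm])
      · rcases List.mem_cons.mp hs with rfl | hs
        · exact le_trans h1 hax
        · exact h2 s hs

lemma max2_foldl_ge :
    ∀ (l : List (Int × Int)) (a m : Int × Int),
      l.foldl pvMaxStep (some a) = some m →
        (m = a ∨ m ∈ l) ∧ a.1 ≤ m.1 ∧ ∀ s ∈ l, s.1 ≤ m.1 := by
  intro l
  induction l with
  | nil => intro a m h; simp at h; subst h; simp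
  | cons x t ih =>
    intro a m h
    simp only [List.foldl_cons, pvMaxStep] at h
    by_cases hc : (decide (a.1 < x.1) || !decide (x.1 < a.1) && decide (a.2 < x.2)) = true
    · rw [if_pos hc] at h
      obtain ⟨hm, h1, h2⟩ := ih x m h
      have hax : a.1 ≤ x.1 := by
        simp only [Bool.or_eq_true, Bool.and_eq_true, decide_eq_true_eq,
          Bool.not_eq_eq_eq_not, Bool.not_true, decide_eq_false_iff_not] at hc
        rcases hc with h' | ⟨h', _⟩ <;> omega
      refine ⟨?_, le_trans hax h1, fun s hs => ?_⟩
      · rcases hm with rfl | hm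
        · exact Or.inr (by simp)
        · exact Or.inr (by simp [hm])
      · rcases List.mem_cons.mp hs with rfl | hs
        · exact h1
        · exact h2 s hs
    · rw [if_neg hc] at h
      obtain ⟨hm, h1, h2⟩ := ih a m h
      have hxa : x.1 ≤ a.1 := by
        simp only [Bool.or_eq_true, Bool.and_eq_true, decide_eq_true_eq,
          Bool.not_eq_eq_eq_not, Bool.not_true, decide_eq_false_iff_not, not_or,
          not_and, not_lt] at hc
        exact hc.1
      refine ⟨?_, h1, fun s hs => ?_⟩
      · rcases hm with rfl | hm
        · exact Or.inl rfl
        · exact Or.inr (by simp [hm])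
      · rcases List.mem_cons.mp hs with rfl | hs
        · exact le_trans hxa h1
        · exact h2 s hs

lemma min2_spec {stones : List (Int × Int)} {mn : Int × Int}
    (h : PySem.List.min2? stones Prod.fst Prod.snd = some mn) :
    mn ∈ stones ∧ ∀ s ∈ stones, mn.1 ≤ s.1 := by
  rw [min2_eq_foldl] at h
  cases stones with
  | nil => simp at h
  | cons x t =>
    simp only [List.foldl_cons, pvMinStep] at h
    obtain ⟨hm, h1, h2⟩ := min2_foldl_le t x mn h
    refine ⟨?_, fun s hs => ?_⟩
    · rcases hm with rfl | hm
      · simp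
      · simp [hm]
    · rcases List.mem_cons.mp hs with rfl | hs
      · exact h1
      · exact h2 s hs

lemma max2_spec {stones : List (Int × Int)} {mx : Int × Int}
    (h : PySem.List.max2? stones Prod.fst Prod.snd = some mx) :
    mx ∈ stones ∧ ∀ s ∈ stones, s.1 ≤ mx.1 := by
  rw [max2_eq_foldl] at h
  cases stones with
  | nil => simp at h
  | cons x t =>
    simp only [List.foldl_cons, pvMaxStep] at h
    obtain ⟨hm, h1, h2⟩ := max2_foldl_ge t x mx h
    refine ⟨?_, fun s hs => ?_⟩
    · rcases hm with rfl | hm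
      · simp
      · simp [hm]
    · rcases List.mem_cons.mp hs with rfl | hs
      · exact h1
      · exact h2 s hs

lemma min_foldl_some : ∀ (t : List (Int × Int)) (a : Int × Int),
    ∃ m, t.foldl pvMinStep (some a) = some m := by
  intro t
  induction t with
  | nil => intro a; exact ⟨a, rfl⟩
  | cons x t ih =>
    intro a
    simp only [List.foldl_cons, pvMinStep]
    split <;> exact ih _

lemma max_foldl_some : ∀ (t : List (Int × Int)) (a : Int × Int),
    ∃ m, t.foldl pvMaxStep (some a) = some m := by
  intro t
  induction t with
  | nil => intro a; exact ⟨a, rfl⟩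
  | cons x t ih =>
    intro a
    simp only [List.foldl_cons, pvMaxStep]
    split <;> exact ih _

lemma min2_isSome {stones : List (Int × Int)} (h : stones ≠ []) :
    ∃ mn, PySem.List.min2? stones Prod.fst Prod.snd = some mn := by
  cases stones with
  | nil => exact absurd rfl h
  | cons x t =>
    rw [min2_eq_foldl]
    simpa only [List.foldl_cons, pvMinStep] using min_foldl_some t x

lemma max2_isSome {stones : List (Int × Int)} (h : stones ≠ []) :
    ∃ mx, PySem.List.max2? stones Prod.fst Prod.snd = some mx := by
  cases stones with
  | nil => exact absurd rfl h
  | cons x t =>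
    rw [max2_eq_foldl]
    simpa only [List.foldl_cons, pvMaxStep] using max_foldl_some t x

-- ===== VERDICT (by name: the statement is the Claim_ definition above) =====
theorem generate_cave_map_spec : Claim_equal_generate_cave_map := by
  intro stones y_max _ hPre
  unfold Spec_generate_cave_map generate_cave_map generate_cave_map_alt
  obtain ⟨mn, hmn⟩ := min2_isSome hPre
  obtain ⟨mx, hmx⟩ := max2_isSome hPre
  obtain ⟨hmnMem, hmnLe⟩ := min2_spec hmn
  obtain ⟨hmxMem, hmxGe⟩ := max2_spec hmx
  -- B's min/max over the x-coordinate list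
  have hxs : stones.map Prod.fst ≠ [] := by simpa using hPre
  obtain ⟨xlo, hxlo⟩ : ∃ v, PySem.List.min? (stones.map Prod.fst) (fun v => v) = some v := by
    cases hv : PySem.List.min? (stones.map Prod.fst) (fun v => v) with
    | none => exact absurd ((PySem.List.min?_eq_none_iff _ _).mp hv) hxs
    | some v => exact ⟨v, rfl⟩
  obtain ⟨xhi, hxhi⟩ : ∃ v, PySem.List.max? (stones.map Prod.fst) (fun v => v) = some v := by
    cases hv : PySem.List.max? (stones.map Prod.fst) (fun v => v) with
    | none => exact absurd ((PySem.List.max?_eq_none_iff _ _).mp hv) hxs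
    | some v => exact ⟨v, rfl⟩
  have hlo : xlo = mn.1 := by
    have hmem := PySem.List.min?_mem hxlo
    obtain ⟨s, hs, rfl⟩ := List.mem_map.mp hmem
    have h1 : mn.1 ≤ s.1 := hmnLe s hs
    have h2 := PySem.List.min?_isMin hxlo mn.1 (List.mem_map.mpr ⟨mn, hmnMem, rfl⟩)
    omega
  have hhi : xhi = mx.1 := by
    have hmem := PySem.List.max?_mem hxhi
    obtain ⟨s, hs, rfl⟩ := List.mem_map.mp hmem
    have h1 : s.1 ≤ mx.1 := hmxGe s hs
    have h2 := PySem.List.max?_isMax hxhi mx.1 (List.mem_map.mpr ⟨mx, hmxMem, rfl⟩)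
    omega
  subst hlo hhi
  simp only [hmn, hmx, hxlo, hxhi]
  set K := caveKeys mn.1 mx.1 y_max with hKdef
  have hA : (PySem.List.pyRange 0 (y_max + 1)).foldl (fun d y =>
        (PySem.List.pyRange mn.1 (mx.1 + 1)).foldl (fun d x =>
          d.insert (x, y) (if (x, y) ∈ stones then (1 : Int) else 0)) d)
        PySem.Dict.empty
      = K.foldl (fun d k => d.insert k (if k ∈ stones then (1 : Int) else 0))
          PySem.Dict.empty :=
    nested_eq_flat (fun k => if k ∈ stones then (1 : Int) else 0) _ _ _
  rw [hA]
  have hAitems := fill_items (fun k => if k ∈ stones then (1 : Int) else 0) mn.1 mx.1 y_max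
  have hB0items := fill_items (fun _ => (0 : Int)) mn.1 mx.1 y_max
  have hBitems := mark_items y_max K (fun k hk => (mem_caveKeys.mp hk).2) stones
      (fun _ => (0 : Int))
      (K.foldl (fun d k => d.insert k (0 : Int)) PySem.Dict.empty)
      (fun s hs hgs => mem_caveKeys.mpr ⟨⟨hmnLe s hs, hmxGe s hs⟩, hgs⟩)
      (by simpa using hB0items)
  have hflat : (List.flatMap (fun y => List.map (fun x => (x, y)) (PySem.List.pyRange mn.1 (mx.1 + 1))) (PySem.List.pyRange 0 (y_max + 1))) = K := rfl
  rw [hflat, hBitems, hAitems]
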